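-- pv_equiv track=rewrite | github.com/ananthchellappa/python | circuits/node_counter.py | aggregate_by_level
-- ===== SOURCE A (Python) =====
-- from collections import Counter
-- from typing import Callable, Iterable, Iterator, List, Optional, Sequence, Tuple
--
-- def split_instance_segments(node: str) -> List[str]:
--     """
--     Return consecutive instance segments from the start of a hierarchical node.
--     Instance segments are those starting with 'x'/'X'. Stops at first non-instance part.
--     E.g.:
--       'xtop2.xb4.net123' -> ['xtop2', 'xb4']
--       'xtop1.xa2.M3:d'   -> ['xtop1', 'xa2']
--     """
--     segs = node.split('.')
--     insts: List[str] = []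
--     for seg in segs:
--         core = seg.split(':', 1)[0]
--         if core and core[0] in ('x', 'X'):
--             insts.append(core)
--         else:
--             break
--     return insts
--
-- def instance_prefixes(insts: Sequence[str], max_levels: int) -> List[str]:
--     """Return cumulative prefixes up to max_levels (at most len(insts))."""
--     out: List[str] = []
--     for i in range(1, min(max_levels, len(insts)) + 1):
--         out.append('.'.join(insts[:i]))
--     return out
--
-- def aggregate_by_level(nodes: Sequence[str], max_levels: int) -> Tuple[int, List[Counter[str]]]:
--     """
--     For each node, compute its instance prefixes once,
--     then aggregate counts per level (level 0=top instance, etc.).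
--     Returns (total_nodes, [Counter per level]).
--     """
--     total = len(nodes)
--     if total == 0:
--         return 0, []
--
--     level_counters: List[Counter[str]] = [Counter() for _ in range(max_levels)]
--     for node in nodes:
--         insts = split_instance_segments(node)
--         if not insts:
--             continue
--         prefs = instance_prefixes(insts, max_levels)
--         for lvl, pref in enumerate(prefs):
--             level_counters[lvl][pref] += 1
--     return total, level_counters
-- ===== SOURCE B (Python) =====
-- from collections import Counter
--
--
-- def aggregate_by_level(nodes, max_levels):
--     total = len(nodes)
--     if total == 0:
--         return 0, []
--     # Single fused pass: build each prefix incrementally (no slicing/joining),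
--     # counting into one flat table keyed by (level, prefix).
--     flat = Counter()
--     for node in nodes:
--         pref = None
--         lvl = 0
--         for seg in node.split('.'):
--             if lvl >= max_levels:
--                 break
--             core = seg.split(':', 1)[0]
--             if core[:1] not in ('x', 'X'):
--                 break
--             pref = core if pref is None else pref + '.' + core
--             flat[(lvl, pref)] += 1
--             lvl += 1
--     # Pivot the flat table into one Counter per level.
--     level_counters = [Counter() for _ in range(max_levels)]
--     for (lvl, pref), cnt in flat.items():
--         level_counters[lvl][pref] = cnt
--     return total, level_counters
-- ===== Notes on version B (the rewrite author's own statement) =====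
-- stated objective: alternative
-- what changed: Instead of materialising each node's instance-segment list and joining growing slices into per-level Counters, B fuses splitting and prefix-building into one pass that extends the prefix string incrementally and counts into a single flat Counter keyed by (level, prefix), then pivots that flat table into the per-level Counter list in a second pass.
import Mathlib
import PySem

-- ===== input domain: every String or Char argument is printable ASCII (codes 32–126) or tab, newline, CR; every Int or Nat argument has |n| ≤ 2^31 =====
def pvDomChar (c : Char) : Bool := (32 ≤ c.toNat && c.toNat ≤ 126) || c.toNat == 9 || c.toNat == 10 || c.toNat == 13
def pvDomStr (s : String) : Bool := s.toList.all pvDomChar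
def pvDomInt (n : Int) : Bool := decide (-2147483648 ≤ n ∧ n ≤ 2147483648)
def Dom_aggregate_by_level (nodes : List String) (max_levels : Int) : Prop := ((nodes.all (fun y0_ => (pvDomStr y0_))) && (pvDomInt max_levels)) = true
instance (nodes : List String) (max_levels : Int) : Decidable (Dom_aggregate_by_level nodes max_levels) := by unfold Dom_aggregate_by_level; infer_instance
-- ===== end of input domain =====

-- B fuses splitting and prefix-building into one pass that extends the prefix string
-- incrementally and counts into a single flat table keyed by (level, prefix), then pivots
-- that table into the per-level counter list. Objective: alternative decomposition.

-- ===== PORT A =====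
-- seg.split(':', 1)[0]
def pvCoreA (seg : String) : String :=
  PySem.List.pyGetD ((PySem.Str.splitMax? seg ":" 1).getD []) 0 ""

-- the 'for seg in segs: … else break' loop of split_instance_segments
def pvSegLoopA : List String → List String
  | [] => []
  | seg :: rest =>
    let core := pvCoreA seg
    if PySem.Str.pyGet? core 0 == some 'x' || PySem.Str.pyGet? core 0 == some 'X' then
      core :: pvSegLoopA rest
    else []

def split_instance_segments (node : String) : List String :=
  pvSegLoopA (((PySem.Str.split? node ".").getD []))

def instance_prefixes (insts : List String) (max_levels : Int) : List String :=
  (PySem.List.pyRange 1 (min max_levels (insts.length : Int) + 1) 1).foldl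
    (fun out i => out ++ [PySem.Str.join "." (PySem.List.slice insts none (some i))]) []

def aggregate_by_level (nodes : List String) (max_levels : Int) : Int × (List (List (String × Int))) :=
  let total : Int := nodes.length
  if total == 0 then (0, [])
  else
    let level_counters : List (PySem.Dict String Int) :=
      (PySem.List.pyRange 0 max_levels 1).map (fun _ => PySem.Dict.empty)
    let final := nodes.foldl (fun cs node =>
      let insts := split_instance_segments node
      if insts = [] then cs
      else
        (PySem.List.enumerate (instance_prefixes insts max_levels)).foldl
          (fun cs lp =>
            PySem.List.pySetD cs lp.1
              ((PySem.List.pyGetD cs lp.1 PySem.Dict.empty).modify lp.2 0 (· + 1)))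
          cs) level_counters
    (total, final.map (fun c => c.items))

-- ===== PORT B =====
-- the inner 'for seg in node.split('.'): …' loop of Source B: state (pref, lvl, flat), break = return flat
def pvInnerB (m : Int) : List String → Option String → Int → PySem.Dict (Int × String) Int → PySem.Dict (Int × String) Int
  | [], _, _, flat => flat
  | seg :: rest, pref, lvl, flat =>
    if m ≤ lvl then flat
    else
      let core := PySem.List.pyGetD ((PySem.Str.splitMax? seg ":" 1).getD []) 0 ""
      if !(PySem.Str.slice core none (some 1) == "x" || PySem.Str.slice core none (some 1) == "X") then flat
      else
        let pref' := match pref with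
          | none => core
          | some p => p ++ "." ++ core
        pvInnerB m rest (some pref') (lvl + 1) (flat.modify (lvl, pref') 0 (· + 1))

def aggregate_by_level_alt (nodes : List String) (max_levels : Int) : Int × (List (List (String × Int))) :=
  let total : Int := nodes.length
  if total == 0 then (0, [])
  else
    let flat := nodes.foldl
      (fun flat node => pvInnerB max_levels (((PySem.Str.split? node ".").getD [])) none 0 flat)
      PySem.Dict.empty
    let level_counters : List (PySem.Dict String Int) :=
      (PySem.List.pyRange 0 max_levels 1).map (fun _ => PySem.Dict.empty)
    let final := flat.items.foldl
      (fun cs it =>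
        PySem.List.pySetD cs it.1.1
          ((PySem.List.pyGetD cs it.1.1 PySem.Dict.empty).insert it.1.2 it.2))
      level_counters
    (total, final.map (fun c => c.items))

-- ===== PRECONDITION & SPEC =====
def Spec_aggregate_by_level (nodes : List String) (max_levels : Int) (out : Int × (List (List (String × Int)))) : Prop := out = aggregate_by_level_alt nodes max_levels
instance (nodes : List String) (max_levels : Int) (out : Int × (List (List (String × Int)))) : Decidable (Spec_aggregate_by_level nodes max_levels out) := by unfold Spec_aggregate_by_level; infer_instance

-- ===== CLAIM (what is proved, stated in full; the proofs are below) =====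
def Claim_equal_aggregate_by_level : Prop := ∀ (nodes : List String) (max_levels : Int), Dom_aggregate_by_level nodes max_levels → Spec_aggregate_by_level nodes max_levels (aggregate_by_level nodes max_levels)

-- ===== LEMMAS AND PROOFS =====

-- ---- proof-only helpers ----

-- B-style segment loop (slice test), for relating the two boundary conditions
def pvSegLoopB : List String → List String
  | [] => []
  | seg :: rest =>
    let core := PySem.List.pyGetD ((PySem.Str.splitMax? seg ":" 1).getD []) 0 ""
    if PySem.Str.slice core none (some 1) == "x" || PySem.Str.slice core none (some 1) == "X" then
      core :: pvSegLoopB rest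
    else []

-- the prefix list of one node (normal form both sides are reduced to)
def pvPrefixesB (node : String) (max_levels : Int) : List String :=
  let insts := pvSegLoopB (((PySem.Str.split? node ".").getD []))
  let k := min max_levels (insts.length : Int)
  (PySem.List.pyRange 0 k 1).map
    (fun i => PySem.Str.join "." (PySem.List.slice insts none (some (i + 1))))

-- A's per-item counter update
def pvUpd (cs : List (PySem.Dict String Int)) (lp : Int × String) : List (PySem.Dict String Int) :=
  PySem.List.pySetD cs lp.1 ((PySem.List.pyGetD cs lp.1 PySem.Dict.empty).modify lp.2 0 (· + 1))

-- the stream of level-lvl prefixes contributed by ns, in node order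
def pvCnt (ns : List String) (m lvl : Int) : List String :=
  (ns.map (fun node => pvPrefixesB node m)).filterMap (fun prefs =>
    if lvl < (prefs.length : Int) then PySem.List.pyGet? prefs lvl else none)

-- B's flat-counter update
def pvMod (f : PySem.Dict (Int × String) Int) (k : Int × String) : PySem.Dict (Int × String) Int :=
  f.modify k 0 (· + 1)

-- B's pivot step
def pvPiv (cs : List (PySem.Dict String Int)) (it : (Int × String) × Int) : List (PySem.Dict String Int) :=
  PySem.List.pySetD cs it.1.1 ((PySem.List.pyGetD cs it.1.1 PySem.Dict.empty).insert it.1.2 it.2)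

-- the enumerated (level, prefix) key stream of one node / of all nodes
def pvEnum (l : List String) : List (Int × String) :=
  (List.range l.length).map (fun (i : Nat) => ((i : Int), l.getD i ""))

def pvS (nodes : List String) (m : Int) : List (Int × String) :=
  nodes.flatMap (fun node => pvEnum (pvPrefixesB node m))

-- the level-j sub-stream of a (level, prefix) stream
def pvLvl (j : Int) (S : List (Int × String)) : List String :=
  S.filterMap (fun k => if k.1 = j then some k.2 else none)

-- ---- A-side lemmas ----

-- B's 'core[:1] in ('x','X')' test equals A's 'core and core[0] in ('x','X')' test
lemma pvCond_eq (core : String) :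
    (PySem.Str.slice core none (some 1) == "x" || PySem.Str.slice core none (some 1) == "X")
      = (PySem.Str.pyGet? core 0 == some 'x' || PySem.Str.pyGet? core 0 == some 'X') := by
  obtain ⟨l, rfl⟩ : ∃ l, core = String.ofList l := ⟨core.toList, String.ofList_toList.symm⟩
  cases l with
  | nil => decide
  | cons c t =>
    have h1 : ("x" : String) = String.ofList ['x'] := rfl
    have h2 : ("X" : String) = String.ofList ['X'] := rfl
    have key : ∀ (d : Char), (String.ofList [c] == String.ofList [d]) = (c == d) := by
      intro d
      simp [String.ofList_inj]
    have hsl : PySem.Str.slice (String.ofList (c :: t)) none (some 1) = String.ofList [c] := by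
      simp [PySem.Str.slice, PySem.Chars.slice, PySem.List.slice, String.toList_ofList]
    have hg : PySem.Str.pyGet? (String.ofList (c :: t)) 0 = some c := by
      simp [PySem.Str.pyGet?, PySem.Chars.pyGet?, PySem.List.pyGet?, PySem.List.pyIdx?,
        String.toList_ofList]
    rw [hsl, hg, h1, h2, key, key]
    simp

lemma pvSegLoop_eq (segs : List String) : pvSegLoopB segs = pvSegLoopA segs := by
  induction segs with
  | nil => rfl
  | cons seg rest ih =>
    rw [pvSegLoopB, pvSegLoopA]
    simp only [pvCoreA, pvCond_eq]
    split <;> simp [ih]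

lemma pvPrefs_eq (node : String) (m : Int) :
    instance_prefixes (split_instance_segments node) m = pvPrefixesB node m := by
  unfold instance_prefixes pvPrefixesB split_instance_segments
  rw [pvSegLoop_eq]
  simp only [PySem.List.foldl_append_singleton_eq_map, PySem.List.pyRange_one, List.map_map,
    List.nil_append, Int.add_sub_cancel, Int.sub_zero]
  apply List.map_congr_left
  intro k _
  simp only [Function.comp_apply]
  have e : (1 : Int) + (k : Int) = 0 + (k : Int) + 1 := by ring
  rw [e]

lemma pvPrefixesB_nil (node : String) (m : Int) (h : split_instance_segments node = []) :
    pvPrefixesB node m = [] := by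
  unfold pvPrefixesB
  rw [pvSegLoop_eq]
  unfold split_instance_segments at h
  rw [h]
  simp [PySem.List.pyRange_one_eq_nil (min_le_right m 0)]

lemma pvStep_eq (cs : List (PySem.Dict String Int)) (node : String) (m : Int) :
    (if split_instance_segments node = [] then cs
     else (PySem.List.enumerate (instance_prefixes (split_instance_segments node) m)).foldl pvUpd cs)
    = (PySem.List.enumerate (pvPrefixesB node m)).foldl pvUpd cs := by
  split
  · rename_i h
    rw [pvPrefixesB_nil node m h, PySem.List.enumerate_nil, List.foldl_nil]
  · rw [pvPrefs_eq]

lemma pvFoldUpd_length (l : List (Int × String)) : ∀ cs, (l.foldl pvUpd cs).length = cs.length := by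
  induction l with
  | nil => intro cs; rfl
  | cons x t ih =>
    intro cs
    rw [List.foldl_cons, ih]
    simp [pvUpd, PySem.List.length_pySetD]

lemma pvOuter_length (m : Int) (ns : List String) :
    ∀ init, (ns.foldl (fun cs node => (PySem.List.enumerate (pvPrefixesB node m)).foldl pvUpd cs) init).length
      = init.length := by
  induction ns with
  | nil => intro init; rfl
  | cons n t ih =>
    intro init
    rw [List.foldl_cons, ih, pvFoldUpd_length]

lemma pvScatter (prefs : List String) : ∀ (s : Nat) (cs : List (PySem.Dict String Int)) (j : Nat), j < cs.length →
    ((PySem.List.enumerate prefs (s : Int)).foldl pvUpd cs).getD j PySem.Dict.empty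
      = if s ≤ j ∧ j < s + prefs.length
          then (cs.getD j PySem.Dict.empty).modify (prefs.getD (j - s) "") 0 (· + 1)
          else cs.getD j PySem.Dict.empty := by
  induction prefs with
  | nil =>
    intro s cs j hj
    rw [PySem.List.enumerate_nil, List.foldl_nil, if_neg (by simp)]
  | cons p ps ih =>
    intro s cs j hj
    simp only [List.length_cons]
    rw [PySem.List.enumerate_cons, List.foldl_cons]
    have hs1 : ((s : Int) + 1) = ((s + 1 : Nat) : Int) := by push_cast; ring
    have hlen : j < (pvUpd cs ((s : Int), p)).length := by
      simpa [pvUpd, PySem.List.length_pySetD] using hj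
    rw [hs1, ih (s + 1) _ j hlen]
    have hset : pvUpd cs ((s : Int), p)
        = cs.set s ((cs.getD s PySem.Dict.empty).modify p 0 (· + 1)) := by
      simp [pvUpd, PySem.List.pySetD_natCast, PySem.List.pyGetD_natCast]
    rw [hset]
    by_cases hjs : j = s
    · subst hjs
      rw [if_neg (by omega), if_pos (by omega)]
      simp [List.getD_eq_getElem?_getD, hj]
    · by_cases hlt : s + 1 ≤ j ∧ j < s + 1 + ps.length
      · rw [if_pos hlt, if_pos (by omega)]
        have hidx : j - s = (j - (s + 1)) + 1 := by omega
        simp [List.getD_eq_getElem?_getD, Ne.symm hjs, hidx]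
      · rw [if_neg hlt, if_neg (by omega)]
        simp [List.getD_eq_getElem?_getD, Ne.symm hjs]

lemma pvMain (m : Int) (ns : List String) (j : Nat) (hj : j < m.toNat) :
    (ns.foldl (fun cs node => (PySem.List.enumerate (pvPrefixesB node m)).foldl pvUpd cs)
        ((PySem.List.pyRange 0 m 1).map (fun _ => PySem.Dict.empty))).getD j PySem.Dict.empty
      = PySem.Dict.counter (pvCnt ns m (j : Int)) := by
  induction ns using List.reverseRecOn with
  | nil =>
    have hjl : j < (PySem.List.pyRange 0 m 1).length := by
      rw [PySem.List.length_pyRange_one]; omega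
    rw [List.foldl_nil]
    have hc : pvCnt [] m (j : Int) = [] := rfl
    rw [hc, PySem.Dict.counter_eq_foldl, List.foldl_nil]
    simp [List.getD_eq_getElem?_getD]
  | append_singleton ns n ih =>
    rw [List.foldl_append, List.foldl_cons, List.foldl_nil]
    have hlen : j < (ns.foldl (fun cs node => (PySem.List.enumerate (pvPrefixesB node m)).foldl pvUpd cs)
        ((PySem.List.pyRange 0 m 1).map (fun _ => PySem.Dict.empty))).length := by
      rw [pvOuter_length, List.length_map, PySem.List.length_pyRange_one]; omega
    have hs := pvScatter (pvPrefixesB n m) 0 _ j hlen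
    rw [Nat.cast_zero] at hs
    rw [hs, ih]
    by_cases hc : j < (pvPrefixesB n m).length
    · have hcnt : pvCnt (ns ++ [n]) m (j : Int)
          = pvCnt ns m (j : Int) ++ [(pvPrefixesB n m).getD j ""] := by
        unfold pvCnt
        rw [List.map_append, List.filterMap_append]
        simp [hc]
      rw [hcnt, if_pos ⟨Nat.zero_le j, by omega⟩]
      simp only [PySem.Dict.counter_eq_foldl]
      rw [List.foldl_append, List.foldl_cons, List.foldl_nil]
      simp
    · have hcnt : pvCnt (ns ++ [n]) m (j : Int) = pvCnt ns m (j : Int) := by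
        unfold pvCnt
        rw [List.map_append, List.filterMap_append]
        simp [hc]
      rw [hcnt, if_neg (by omega)]

-- ---- B-side lemmas ----

-- join over a snoc, for the incremental prefix of B
lemma pvCharsJoin_snoc (sep : List Char) (parts : List (List Char)) (c : List Char) (h : parts ≠ []) :
    PySem.Chars.join sep (parts ++ [c]) = PySem.Chars.join sep parts ++ sep ++ c := by
  induction parts with
  | nil => exact absurd rfl h
  | cons a t ih =>
    cases t with
    | nil => simp [PySem.Chars.join_singleton, PySem.Chars.join_cons_cons]
    | cons b t2 =>
      rw [List.cons_append, List.cons_append, PySem.Chars.join_cons_cons, PySem.Chars.join_cons_cons,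
        ← List.cons_append, ih (by simp)]
      simp [List.append_assoc]
lemma pvJoin_snoc (acc : List String) (c : String) (h : acc ≠ []) :
    PySem.Str.join "." (acc ++ [c]) = PySem.Str.join "." acc ++ "." ++ c := by
  rw [← String.toList_inj]
  simp only [PySem.Str.toList_join, String.toList_append, List.map_append, List.map_cons, List.map_nil]
  rw [pvCharsJoin_snoc _ _ _ (by simpa using h)]
lemma pvJoin_one (c : String) : PySem.Str.join "." [c] = c := by
  rw [← String.toList_inj]
  simp [PySem.Str.toList_join, PySem.Chars.join_singleton]

-- the prefix list as a range of joined takes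
lemma pvPrefixesB_takes (node : String) (m : Int) :
    pvPrefixesB node m
      = (List.range ((min m ((pvSegLoopB (((PySem.Str.split? node ".").getD []))).length : Int)).toNat)).map
          (fun i => PySem.Str.join "." ((pvSegLoopB (((PySem.Str.split? node ".").getD []))).take (i + 1))) := by
  simp only [pvPrefixesB]
  generalize pvSegLoopB (((PySem.Str.split? node ".").getD [])) = insts
  generalize hk : min m ((insts.length : Nat) : Int) = k
  by_cases hpos : 0 ≤ k
  · have : k = ((k.toNat : Nat) : Int) := (Int.toNat_of_nonneg hpos).symm
    rw [this, PySem.List.pyRange_zero_natCast, List.map_map]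
    apply List.map_congr_left
    intro i hi2
    simp only [Function.comp_apply]
    rw [PySem.List.slice_to _ (by omega)]
    have h3 : ((i : Int) + 1).toNat = i + 1 := by omega
    rw [h3]
  · rw [PySem.List.pyRange_one_eq_nil (by omega)]
    rw [Int.toNat_of_nonpos (by omega)]
    rfl


-- B's inner loop is the modify-fold over the enumerated key stream (generalised state)
set_option maxHeartbeats 1000000 in
lemma pvInnerB_eq (m : Int) (segs : List String) : ∀ (acc : List String) (flat : PySem.Dict (Int × String) Int),
    pvInnerB m segs (if acc = [] then none else some (PySem.Str.join "." acc)) (acc.length : Int) flat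
      = ((List.range ((min (m - acc.length) ((pvSegLoopB segs).length : Int)).toNat)).map
          (fun i => (((acc.length + i : Nat) : Int), PySem.Str.join "." (acc ++ (pvSegLoopB segs).take (i + 1))))).foldl
          pvMod flat := by
  induction segs with
  | nil =>
    intro acc flat
    have : (min (m - acc.length) (((pvSegLoopB []).length : Nat) : Int)).toNat = 0 := by
      simp [pvSegLoopB]
    rw [this]
    rfl
  | cons seg rest ih =>
    intro acc flat
    rw [pvInnerB, pvSegLoopB]
    by_cases hm : m ≤ (acc.length : Int)
    · rw [if_pos hm]
      rw [Int.toNat_eq_zero.mpr (le_trans (min_le_left _ _) (by omega))]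
      rfl
    · rw [if_neg hm]
      set core := PySem.List.pyGetD ((PySem.Str.splitMax? seg ":" 1).getD []) 0 "" with hcore
      by_cases hc : (PySem.Str.slice core none (some 1) == "x" || PySem.Str.slice core none (some 1) == "X") = true
      · rw [if_neg (by simp [hc]), if_pos hc]
        have hpref : (match (if acc = [] then none else some (PySem.Str.join "." acc)) with
            | none => core
            | some p => p ++ "." ++ core) = PySem.Str.join "." (acc ++ [core]) := by
          by_cases ha : acc = []
          · subst ha; simp [pvJoin_one]
          · rw [if_neg ha, pvJoin_snoc acc core ha]
        have hlen2 : ((acc.length : Int) + 1) = (((acc ++ [core]).length : Nat) : Int) := by simp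
        rw [hpref, hlen2]
        show pvInnerB m rest (some (PySem.Str.join "." (acc ++ [core]))) (((acc ++ [core]).length : Nat) : Int)
              (flat.modify ((acc.length : Int), PySem.Str.join "." (acc ++ [core])) 0 (· + 1)) = _
        have hlen : ((acc.length : Int) + 1) = (((acc ++ [core]).length : Nat) : Int) := by
          simp
        have hifne : (if acc ++ [core] = [] then none else some (PySem.Str.join "." (acc ++ [core])))
            = some (PySem.Str.join "." (acc ++ [core])) := by simp
        rw [← hifne, ih (acc ++ [core])]
        -- now massage the RHS index list
        have hK : (min (m - acc.length) (((core :: pvSegLoopB rest).length : Nat) : Int)).toNat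
            = (min (m - (acc ++ [core]).length) (((pvSegLoopB rest).length : Nat) : Int)).toNat + 1 := by
          simp only [List.length_cons, List.length_append, List.length_cons, List.length_nil]
          omega
        rw [hK]
        rw [List.range_succ_eq_map]
        rw [List.map_cons]
        rw [List.foldl_cons]
        rw [List.map_map]
        have hinit : pvMod flat (((acc.length + 0 : Nat) : Int), PySem.Str.join "." (acc ++ (core :: pvSegLoopB rest).take (0 + 1)))
            = flat.modify ((acc.length : Int), PySem.Str.join "." (acc ++ [core])) 0 (· + 1) := by
          simp [pvMod]
        have hlist : (List.range ((min (m - ((acc ++ [core]).length : Int)) (((pvSegLoopB rest).length : Nat) : Int)).toNat)).map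
              ((fun (i : Nat) => (((acc.length + i : Nat) : Int), PySem.Str.join "." (acc ++ (core :: pvSegLoopB rest).take (i + 1)))) ∘ Nat.succ)
            = (List.range ((min (m - ((acc ++ [core]).length : Int)) (((pvSegLoopB rest).length : Nat) : Int)).toNat)).map
              (fun (i : Nat) => ((((acc ++ [core]).length + i : Nat) : Int), PySem.Str.join "." ((acc ++ [core]) ++ (pvSegLoopB rest).take (i + 1)))) := by
          apply List.map_congr_left
          intro i hi3
          simp only [Function.comp_apply]
          have e1 : (acc.length + (Nat.succ i)) = ((acc ++ [core]).length + i) := by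
            simp; omega
          have e2 : acc ++ (core :: pvSegLoopB rest).take (Nat.succ i + 1)
              = (acc ++ [core]) ++ (pvSegLoopB rest).take (i + 1) := by
            simp [List.take_succ_cons, List.append_assoc]
          rw [e1, e2]
        rw [hinit, hlist]
      · rw [if_pos (by simp [hc]), if_neg hc]
        rw [Int.toNat_eq_zero.mpr (by simp)]
        rfl


-- pvEnum of a range-built list
lemma pvEnum_mapRange (K : Nat) (f : Nat → String) :
    pvEnum ((List.range K).map f) = (List.range K).map (fun (i : Nat) => ((i : Int), f i)) := by
  unfold pvEnum
  rw [List.length_map, List.length_range]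
  apply List.map_congr_left
  intro i hi
  rw [List.mem_range] at hi
  rw [PySem.List.getD_map_range f K i "" hi]

-- B's inner loop at the initial state
lemma pvInnerB_top (m : Int) (node : String) (flat : PySem.Dict (Int × String) Int) :
    pvInnerB m (((PySem.Str.split? node ".").getD [])) none 0 flat
      = (pvEnum (pvPrefixesB node m)).foldl pvMod flat := by
  have h := pvInnerB_eq m (((PySem.Str.split? node ".").getD [])) [] flat
  simp only [List.length_nil, Nat.cast_zero, List.nil_append, if_true, Int.sub_zero,
    Nat.zero_add] at h
  rw [h, pvPrefixesB_takes, pvEnum_mapRange]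

-- top-level: the whole flat table is the counter of the key stream pvS
lemma pvFlat_fold (m : Int) (ns : List String) :
    ∀ init, ns.foldl (fun flat node => pvInnerB m (((PySem.Str.split? node ".").getD [])) none 0 flat) init
      = (pvS ns m).foldl pvMod init := by
  induction ns with
  | nil => intro init; rfl
  | cons n t ih =>
    intro init
    rw [List.foldl_cons, ih, pvInnerB_top]
    show _ = ((pvEnum (pvPrefixesB n m) ++ pvS t m).foldl pvMod init)
    rw [List.foldl_append]

lemma pvFlat_eq (m : Int) (ns : List String) :
    ns.foldl (fun flat node => pvInnerB m (((PySem.Str.split? node ".").getD [])) none 0 flat) PySem.Dict.empty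
      = PySem.Dict.counter (pvS ns m) := by
  rw [pvFlat_fold, PySem.Dict.counter_eq_foldl]
  rfl

-- membership in the level stream
lemma pvMem_pvLvl (j : Int) (S : List (Int × String)) (p : String) :
    p ∈ pvLvl j S ↔ (j, p) ∈ S := by
  unfold pvLvl
  rw [List.mem_filterMap]
  constructor
  · rintro ⟨k, hk, hf⟩
    by_cases h1 : k.1 = j
    · rw [if_pos h1] at hf
      have : k = (j, p) := by
        obtain ⟨k1, k2⟩ := k
        simp at h1 hf
        simp [h1, hf]
      rwa [this] at hk
    · rw [if_neg h1] at hf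
      exact absurd hf (by simp)
  · intro h
    exact ⟨(j, p), h, by simp⟩

-- the level projection distributes over append
lemma pvLvl_append (j : Int) (S T : List (Int × String)) :
    pvLvl j (S ++ T) = pvLvl j S ++ pvLvl j T := by
  unfold pvLvl
  rw [List.filterMap_append]

-- the level projection of one added element
lemma pvLvl_add (j : Int) (s : PySem.Set (Int × String)) (k : Int × String) :
    pvLvl j (PySem.Set.add s k)
      = if k.1 = j then PySem.Set.add (pvLvl j s) k.2 else pvLvl j s := by
  show pvLvl j (if s.contains k then s else s ++ [k]) = _
  by_cases hm : (j, k.2) ∈ s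
  · by_cases h1 : k.1 = j
    · have hk : k = (j, k.2) := by obtain ⟨k1, k2⟩ := k; simp at h1 ⊢; exact h1
      rw [if_pos (by rw [hk]; exact (PySem.Set.contains_iff s _).mpr hm), if_pos h1]
      show pvLvl j s = if PySem.Set.contains (pvLvl j s) k.2 then pvLvl j s else _
      rw [if_pos ((PySem.Set.contains_iff _ _).mpr ((pvMem_pvLvl j s k.2).mpr hm))]
    · by_cases hc : s.contains k
      · rw [if_pos hc, if_neg h1]
      · rw [if_neg (by simpa using hc), if_neg h1, pvLvl_append]
        have : pvLvl j [k] = [] := by unfold pvLvl; simp [h1]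
        rw [this, List.append_nil]
  · by_cases h1 : k.1 = j
    · have hk : k = (j, k.2) := by obtain ⟨k1, k2⟩ := k; simp at h1 ⊢; exact h1
      have hnc : s.contains k = false := by
        rw [hk]
        by_contra hcc
        exact hm ((PySem.Set.contains_iff s _).mp (by simpa using hcc))
      rw [if_neg (by simpa using hnc), if_pos h1, pvLvl_append]
      have h2 : pvLvl j [k] = [k.2] := by unfold pvLvl; simp [h1]
      rw [h2]
      show _ = if PySem.Set.contains (pvLvl j s) k.2 then pvLvl j s else pvLvl j s ++ [k.2]
      rw [if_neg (by
        by_contra hcc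
        exact hm ((pvMem_pvLvl j s k.2).mp ((PySem.Set.contains_iff _ _).mp (by simpa using hcc))))]
    · by_cases hc : s.contains k
      · rw [if_pos hc, if_neg h1]
      · rw [if_neg (by simpa using hc), if_neg h1, pvLvl_append]
        have : pvLvl j [k] = [] := by unfold pvLvl; simp [h1]
        rw [this, List.append_nil]

-- dedup commutes with the level projection
lemma pvLvl_foldl_add (j : Int) : ∀ (S : List (Int × String)) (s : PySem.Set (Int × String)),
    pvLvl j (S.foldl PySem.Set.add s) = (pvLvl j S).foldl PySem.Set.add (pvLvl j s) := by
  intro S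
  induction S with
  | nil => intro s; rfl
  | cons k S' ih =>
    intro s
    rw [List.foldl_cons, ih, pvLvl_add]
    have hcons : pvLvl j (k :: S') = if k.1 = j then k.2 :: pvLvl j S' else pvLvl j S' := by
      unfold pvLvl
      rw [List.filterMap_cons]
      by_cases h1 : k.1 = j
      · rw [if_pos h1, if_pos h1]
      · rw [if_neg h1, if_neg h1]
    rw [hcons]
    by_cases h1 : k.1 = j
    · rw [if_pos h1, if_pos h1, List.foldl_cons]
    · rw [if_neg h1, if_neg h1]

lemma pvLvl_ofList (j : Int) (S : List (Int × String)) :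
    pvLvl j (PySem.Set.ofList S) = PySem.Set.ofList (pvLvl j S) := by
  rw [PySem.Set.ofList_eq_foldl, PySem.Set.ofList_eq_foldl, pvLvl_foldl_add]
  rfl

-- counts agree between the flat stream and its level stream
lemma pvCount_pvLvl (j : Int) (p : String) (S : List (Int × String)) :
    S.count (j, p) = (pvLvl j S).count p := by
  induction S with
  | nil => rfl
  | cons k S' ih =>
    have hcons : pvLvl j (k :: S') = if k.1 = j then k.2 :: pvLvl j S' else pvLvl j S' := by
      unfold pvLvl
      rw [List.filterMap_cons]
      by_cases h1 : k.1 = j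
      · rw [if_pos h1, if_pos h1]
      · rw [if_neg h1, if_neg h1]
    rw [hcons, List.count_cons]
    by_cases h1 : k.1 = j
    · rw [if_pos h1, List.count_cons, ih]
      obtain ⟨k1, k2⟩ := k
      simp at h1
      subst h1
      by_cases h2 : k2 = p
      · simp [h2]
      · simp [h2]
    · rw [if_neg h1, ih]
      have : ¬ (k = (j, p)) := by
        intro hk
        exact h1 (by rw [hk])
      simp [this]

-- the level-j stream of one node's keys
lemma pvRange_pick (j : Nat) (g : Nat → String) : ∀ (n : Nat),
    (List.range n).filterMap (fun i => if i = j then some (g i) else none)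
      = if j < n then [g j] else [] := by
  intro n
  induction n with
  | zero => simp
  | succ n ih =>
    rw [List.range_succ, List.filterMap_append, ih]
    by_cases h1 : j < n
    · rw [if_pos h1, if_pos (by omega)]
      simp [show ¬ n = j by omega]
    · by_cases h2 : n = j
      · subst h2
        rw [if_neg h1, if_pos (by omega)]
        simp
      · rw [if_neg h1, if_neg (by omega)]
        simp [h2]

lemma pvLvl_pvEnum (j : Nat) (l : List String) :
    pvLvl (j : Int) (pvEnum l) = if j < l.length then [l.getD j ""] else [] := by
  unfold pvLvl pvEnum
  rw [List.filterMap_map]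
  have he : ((fun k => if k.1 = (j : Int) then some k.2 else none) ∘
        (fun (i : Nat) => ((i : Int), l.getD i "")))
      = (fun (i : Nat) => if i = j then some (l.getD i "") else none) := by
    funext i
    simp only [Function.comp_apply]
    by_cases h1 : i = j
    · rw [if_pos (by exact_mod_cast h1), if_pos h1]
    · rw [if_neg (by exact_mod_cast h1), if_neg h1]
  rw [he, pvRange_pick j (fun i => l.getD i "") l.length]

-- the level-j stream of pvS is A's pvCnt stream
lemma pvLvl_pvS (j : Nat) (ns : List String) (m : Int) :
    pvLvl (j : Int) (pvS ns m) = pvCnt ns m (j : Int) := by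
  induction ns with
  | nil => rfl
  | cons n t ih =>
    have hS : pvS (n :: t) m = pvEnum (pvPrefixesB n m) ++ pvS t m := by
      unfold pvS
      rw [List.flatMap_cons]
    rw [hS, pvLvl_append, pvLvl_pvEnum, ih]
    unfold pvCnt
    rw [List.map_cons, List.filterMap_cons]
    by_cases h1 : j < (pvPrefixesB n m).length
    · rw [if_pos h1, if_pos (by exact_mod_cast h1)]
      have : PySem.List.pyGet? (pvPrefixesB n m) ((j : Nat) : Int) = some ((pvPrefixesB n m).getD j "") := by
        rw [PySem.List.pyGet?_natCast, List.getElem?_eq_getElem h1, List.getD_eq_getElem?_getD,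
          List.getElem?_eq_getElem h1]
        rfl
      rw [this]
      rfl
    · rw [if_neg h1, if_neg (by exact_mod_cast h1)]
      rfl

-- the prefix list of a node is never longer than max(m, 0)
lemma pvPrefixesB_length (node : String) (m : Int) :
    ((pvPrefixesB node m).length : Int) ≤ max m 0 := by
  rw [pvPrefixesB_takes, List.length_map, List.length_range]
  omega

-- every key of pvS has 0 ≤ level < m
lemma pvS_bounds (ns : List String) (m : Int) :
    ∀ k ∈ pvS ns m, 0 ≤ k.1 ∧ k.1 < m := by
  intro k hk
  unfold pvS at hk
  rw [List.mem_flatMap] at hk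
  obtain ⟨node, _, hmem⟩ := hk
  unfold pvEnum at hmem
  rw [List.mem_map] at hmem
  obtain ⟨i, hir, hke⟩ := hmem
  rw [List.mem_range] at hir
  have hlen := pvPrefixesB_length node m
  have h1 : k.1 = (i : Int) := by rw [← hke]
  constructor
  · rw [h1]; omega
  · rw [h1]; omega

-- the pivot fold preserves length
lemma pvPiv_length (items : List ((Int × String) × Int)) :
    ∀ cs, (items.foldl pvPiv cs).length = cs.length := by
  induction items with
  | nil => intro cs; rfl
  | cons x t ih =>
    intro cs
    rw [List.foldl_cons, ih]
    simp [pvPiv, PySem.List.length_pySetD]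

-- the pivot fold, read at one level
lemma pvPivot (items : List ((Int × String) × Int)) :
    ∀ (cs : List (PySem.Dict String Int)) (j : Nat), j < cs.length →
      (∀ it ∈ items, 0 ≤ it.1.1 ∧ it.1.1 < (cs.length : Int)) →
      (items.foldl pvPiv cs).getD j PySem.Dict.empty
        = (items.filterMap (fun it => if it.1.1 = (j : Int) then some (it.1.2, it.2) else none)).foldl
            (fun d pc => d.insert pc.1 pc.2) (cs.getD j PySem.Dict.empty) := by
  induction items with
  | nil =>
    intro cs j hj _
    rfl
  | cons it t ih =>
    intro cs j hj hb
    obtain ⟨hb0, hb1⟩ := hb it (by simp)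
    obtain ⟨ln, hl⟩ : ∃ ln : Nat, it.1.1 = (ln : Int) := ⟨it.1.1.toNat, by omega⟩
    have hln : ln < cs.length := by omega
    rw [List.foldl_cons, List.filterMap_cons]
    have hstep : pvPiv cs it = cs.set ln ((cs.getD ln PySem.Dict.empty).insert it.1.2 it.2) := by
      unfold pvPiv
      rw [hl, PySem.List.pySetD_natCast, PySem.List.pyGetD_natCast]
    rw [hstep]
    have hlen' : j < (cs.set ln ((cs.getD ln PySem.Dict.empty).insert it.1.2 it.2)).length := by
      rw [List.length_set]; exact hj
    have hb' : ∀ x ∈ t, 0 ≤ x.1.1 ∧ x.1.1 < ((cs.set ln ((cs.getD ln PySem.Dict.empty).insert it.1.2 it.2)).length : Int) := by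
      intro x hx
      rw [List.length_set]
      exact hb x (by simp [hx])
    rw [ih _ j hlen' hb']
    by_cases hje : ln = j
    · subst hje
      rw [if_pos (by rw [hl]), List.foldl_cons]
      congr 1
      simp [List.getD_eq_getElem?_getD, hln]
    · have : ¬ (it.1.1 = (j : Int)) := by rw [hl]; exact_mod_cast hje
      rw [if_neg this]
      congr 1
      simp [List.getD_eq_getElem?_getD, hje]

-- selecting level j from the counter's items gives that level's own counter items
lemma pvLevelItems (S : List (Int × String)) (j : Nat) :
    ((PySem.Dict.counter S).items.filterMap
        (fun it => if it.1.1 = (j : Int) then some (it.1.2, it.2) else none)).foldl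
        (fun d pc => d.insert pc.1 pc.2) PySem.Dict.empty
      = PySem.Dict.counter (pvLvl (j : Int) S) := by
  rw [PySem.Dict.items_counter, List.filterMap_map]
  have hfun : ((fun (it : (Int × String) × Int) => if it.1.1 = (j : Int) then some (it.1.2, it.2) else none)
        ∘ (fun k => (k, (List.count k S : Int))))
      = (fun (k : Int × String) =>
          if k.1 = (j : Int) then some (k.2, ((pvLvl (j : Int) S).count k.2 : Int)) else none) := by
    funext k
    obtain ⟨k1, k2⟩ := k
    simp only [Function.comp_apply]
    by_cases h1 : k1 = (j : Int)
    · subst h1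
      rw [if_pos rfl, if_pos rfl]
      rw [← pvCount_pvLvl]
    · rw [if_neg h1, if_neg h1]
  rw [hfun]
  have hsel : ∀ (l : List (Int × String)) (c : String → Int),
      l.filterMap (fun k => if k.1 = (j : Int) then some (k.2, c k.2) else none)
        = (pvLvl (j : Int) l).map (fun p => (p, c p)) := by
    intro l c
    induction l with
    | nil => rfl
    | cons k t ih =>
      rw [List.filterMap_cons]
      have hcons : pvLvl (j : Int) (k :: t)
          = if k.1 = (j : Int) then k.2 :: pvLvl (j : Int) t else pvLvl (j : Int) t := by
        unfold pvLvl
        rw [List.filterMap_cons]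
        by_cases h1 : k.1 = (j : Int)
        · rw [if_pos h1, if_pos h1]
        · rw [if_neg h1, if_neg h1]
      rw [hcons]
      by_cases h1 : k.1 = (j : Int)
      · rw [if_pos h1, if_pos h1, List.map_cons, ih]
      · rw [if_neg h1, if_neg h1, ih]
  rw [hsel (PySem.Set.ofList S) (fun p => ((pvLvl (j : Int) S).count p : Int)), pvLvl_ofList]
  apply PySem.Dict.ext
  show (List.foldl (fun d (a : String × Int) => d.insert a.1 a.2) PySem.Dict.empty _).items = _
  rw [PySem.Dict.items_foldl_insert_fresh
      ((PySem.Set.ofList (pvLvl (j : Int) S)).map (fun p => (p, ((pvLvl (j : Int) S).count p : Int))))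
      Prod.fst Prod.snd PySem.Dict.empty
      (by intro a _; rfl)
      (by
        rw [List.map_map]
        have : (Prod.fst ∘ fun p => (p, ((pvLvl (j : Int) S).count p : Int))) = id := by
          funext p; rfl
        rw [this, List.map_id]
        exact PySem.Set.nodup_ofList _)]
  rw [PySem.Dict.items_counter]
  simp [Function.comp_def]
  rfl

-- ===== VERDICT (by name: the statement is the Claim_ definition above) =====
theorem aggregate_by_level_spec : Claim_equal_aggregate_by_level := by
  intro nodes m _
  unfold Spec_aggregate_by_level aggregate_by_level aggregate_by_level_alt
  by_cases hn : nodes = []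
  · subst hn; rfl
  · have hne : (((nodes.length : Int)) == 0) = false := by
      have : nodes.length ≠ 0 := by simpa using hn
      simp; omega
    simp only [hne, Bool.false_eq_true, if_false]
    -- rewrite A's fold into the pvUpd / pvPrefixesB normal form
    have hupd : (fun (cs : List (PySem.Dict String Int)) (lp : Int × String) =>
        PySem.List.pySetD cs lp.1
          ((PySem.List.pyGetD cs lp.1 PySem.Dict.empty).modify lp.2 0 (· + 1))) = pvUpd := rfl
    rw [hupd]
    have hstep : (fun (cs : List (PySem.Dict String Int)) node =>
        let insts := split_instance_segments node
        if insts = [] then cs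
        else (PySem.List.enumerate (instance_prefixes insts m)).foldl pvUpd cs)
        = (fun cs node => (PySem.List.enumerate (pvPrefixesB node m)).foldl pvUpd cs) := by
      funext cs node
      exact pvStep_eq cs node m
    rw [hstep]
    -- rewrite B's flat fold into the counter of pvS, and its pivot into pvPiv
    rw [pvFlat_eq]
    have hpiv : (fun (cs : List (PySem.Dict String Int)) (it : (Int × String) × Int) =>
        PySem.List.pySetD cs it.1.1
          ((PySem.List.pyGetD cs it.1.1 PySem.Dict.empty).insert it.1.2 it.2)) = pvPiv := rfl
    rw [hpiv]
    congr 1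
    apply List.ext_getElem
    · rw [List.length_map, List.length_map, pvOuter_length, pvPiv_length, List.length_map]
    · intro j h1 h2
      rw [List.length_map, pvOuter_length, List.length_map, PySem.List.length_pyRange_one] at h1
      have hj : j < m.toNat := by omega
      have hD : ∀ (l : List (PySem.Dict String Int)) (k : Nat) (hk : k < l.length),
          l[k] = l.getD k PySem.Dict.empty := by
        intro l k hk; rw [List.getD_eq_getElem?_getD, List.getElem?_eq_getElem hk]; rfl
      have hlenA : j < (nodes.foldl (fun cs node => (PySem.List.enumerate (pvPrefixesB node m)).foldl pvUpd cs)
          ((PySem.List.pyRange 0 m 1).map (fun _ => PySem.Dict.empty))).length := by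
        rw [pvOuter_length, List.length_map, PySem.List.length_pyRange_one]; omega
      have hlenB : j < ((PySem.Dict.counter (pvS nodes m)).items.foldl pvPiv
          ((PySem.List.pyRange 0 m 1).map (fun _ => PySem.Dict.empty))).length := by
        rw [pvPiv_length, List.length_map, PySem.List.length_pyRange_one]; omega
      rw [List.getElem_map, List.getElem_map, hD _ j hlenA, hD _ j hlenB,
        pvMain m nodes j hj]
      -- the B side at level j
      have hlenC : j < ((PySem.List.pyRange 0 m 1).map
          (fun _ => (PySem.Dict.empty : PySem.Dict String Int))).length := by
        rw [List.length_map, PySem.List.length_pyRange_one]; omega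
      have hbounds : ∀ it ∈ (PySem.Dict.counter (pvS nodes m)).items,
          0 ≤ it.1.1 ∧ it.1.1 < ((((PySem.List.pyRange 0 m 1).map
            (fun _ => (PySem.Dict.empty : PySem.Dict String Int))).length : Nat) : Int) := by
        intro it hit
        rw [PySem.Dict.items_counter] at hit
        rw [List.mem_map] at hit
        obtain ⟨k, hks, hke⟩ := hit
        have hkS : k ∈ pvS nodes m := (PySem.Set.mem_ofList _ _).mp hks
        have hb := pvS_bounds nodes m k hkS
        have h1' : it.1 = k := by rw [← hke]
        rw [h1', List.length_map, PySem.List.length_pyRange_one]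
        constructor
        · exact hb.1
        · have := hb.2
          omega
      rw [pvPivot _ _ j hlenC hbounds]
      have hbase : (((PySem.List.pyRange 0 m 1).map
          (fun _ => (PySem.Dict.empty : PySem.Dict String Int))).getD j PySem.Dict.empty)
          = PySem.Dict.empty := by
        rw [← hD _ j hlenC, List.getElem_map]
      rw [hbase, pvLevelItems, pvLvl_pvS]
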